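-- pv_equiv track=rewrite | github.com/satvikpanchal/gpt_wrapped | year_timeline.py | generate_month_summary
-- ===== SOURCE A (Python) =====
-- from collections import Counter, defaultdict
--
-- def generate_month_summary(keywords: list, titles: Counter) -> str:
--     """Generate a human readable summary of the month's focus."""
--     if not keywords:
--         return "Quiet month"
--
--     # Get top keywords
--     top_words = [k[0] for k in keywords[:10]]
--
--     # Theme detection based on keywords
--     themes = []
--
--     # Tech/Cloud themes
--     if any(w in top_words for w in ["aws", "sqs", "s3", "lambda", "cloud", "ec2"]):
--         themes.append("AWS & Cloud")
--     if any(w in top_words for w in ["spark", "hadoop", "databricks", "pyspark"]):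
--         themes.append("Spark & Big Data")
--     if any(w in top_words for w in ["docker", "kubernetes", "k8s", "container"]):
--         themes.append("DevOps")
--
--     # ML/AI themes
--     if any(w in top_words for w in ["model", "training", "neural", "deep", "learning", "tensorflow", "pytorch"]):
--         themes.append("Machine Learning")
--     if any(w in top_words for w in ["data", "mining", "analysis", "analytics"]):
--         themes.append("Data Mining")
--     if any(w in top_words for w in ["fraud", "detection", "classification"]):
--         themes.append("Fraud Detection")
--
--     # Academic themes
--     if any(w in top_words for w in ["homework", "assignment", "project", "class", "course"]):
--         themes.append("Coursework")
--     if any(w in top_words for w in ["paper", "research", "thesis"]):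
--         themes.append("Research")
--
--     # Specific tech
--     if any(w in top_words for w in ["python", "java", "javascript", "typescript"]):
--         themes.append("Coding")
--     if any(w in top_words for w in ["robot", "robotics", "ros", "simulation"]):
--         themes.append("Robotics")
--     if any(w in top_words for w in ["greengrass", "iot", "edge"]):
--         themes.append("Edge Computing")
--
--     # Life themes
--     if any(w in top_words for w in ["startup", "business", "product", "launch"]):
--         themes.append("Startup Mode")
--     if any(w in top_words for w in ["interview", "job", "resume", "career"]):
--         themes.append("Career Hunt")
--     if any(w in top_words for w in ["relma", "scale", "growth"]):
--         themes.append("Scaling Up")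
--
--     # Misc fun
--     if any(w in top_words for w in ["recipe", "food", "cook"]):
--         themes.append("Cooking")
--     if any(w in top_words for w in ["spotify", "music", "wrapped"]):
--         themes.append("Spotify Wrapped")
--     if any(w in top_words for w in ["party", "event", "planning"]):
--         themes.append("Party Planning")
--
--     if themes:
--         return " + ".join(themes[:3])
--     else:
--         # Fall back to top keywords
--         return " ".join(top_words[:3]).title()
-- ===== SOURCE B (Python) =====
-- # Inverted index: instead of testing every theme's keyword group against the top
-- # words, map each keyword to its theme index once, scan the top words a single
-- # time collecting matched theme indices, and emit labels of the sorted indices.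
-- # Exact because the 67 keywords are pairwise distinct across groups and theme
-- # order equals index order.
-- _THEME_LABELS = [
--     "AWS & Cloud", "Spark & Big Data", "DevOps", "Machine Learning",
--     "Data Mining", "Fraud Detection", "Coursework", "Research", "Coding",
--     "Robotics", "Edge Computing", "Startup Mode", "Career Hunt", "Scaling Up",
--     "Cooking", "Spotify Wrapped", "Party Planning",
-- ]
-- _THEME_WORDS = [
--     ("aws", "sqs", "s3", "lambda", "cloud", "ec2"),
--     ("spark", "hadoop", "databricks", "pyspark"),
--     ("docker", "kubernetes", "k8s", "container"),
--     ("model", "training", "neural", "deep", "learning", "tensorflow", "pytorch"),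
--     ("data", "mining", "analysis", "analytics"),
--     ("fraud", "detection", "classification"),
--     ("homework", "assignment", "project", "class", "course"),
--     ("paper", "research", "thesis"),
--     ("python", "java", "javascript", "typescript"),
--     ("robot", "robotics", "ros", "simulation"),
--     ("greengrass", "iot", "edge"),
--     ("startup", "business", "product", "launch"),
--     ("interview", "job", "resume", "career"),
--     ("relma", "scale", "growth"),
--     ("recipe", "food", "cook"),
--     ("spotify", "music", "wrapped"),
--     ("party", "event", "planning"),
-- ]
-- _WORD_THEME = {w: i for i, ws in enumerate(_THEME_WORDS) for w in ws}
--
--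
-- def generate_month_summary(keywords: list, titles) -> str:
--     """Generate a human readable summary of the month's focus."""
--     if not keywords:
--         return "Quiet month"
--     top_words = [k[0] for k in keywords[:10]]
--     matched = {_WORD_THEME[w] for w in top_words if w in _WORD_THEME}
--     themes = [_THEME_LABELS[i] for i in sorted(matched)[:3]]
--     if themes:
--         return " + ".join(themes)
--     return " ".join(top_words[:3]).title()
-- ===== Notes on version B (the rewrite author's own statement) =====
-- stated objective: alternative
-- what changed: Inverts the data: a precomputed word->theme-index dictionary replaces the 17 per-theme any() scans; one pass over the top words collects matched theme indices in a set and the labels of the sorted indices are joined, so the loop over theme keyword groups disappears.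
import Mathlib
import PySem

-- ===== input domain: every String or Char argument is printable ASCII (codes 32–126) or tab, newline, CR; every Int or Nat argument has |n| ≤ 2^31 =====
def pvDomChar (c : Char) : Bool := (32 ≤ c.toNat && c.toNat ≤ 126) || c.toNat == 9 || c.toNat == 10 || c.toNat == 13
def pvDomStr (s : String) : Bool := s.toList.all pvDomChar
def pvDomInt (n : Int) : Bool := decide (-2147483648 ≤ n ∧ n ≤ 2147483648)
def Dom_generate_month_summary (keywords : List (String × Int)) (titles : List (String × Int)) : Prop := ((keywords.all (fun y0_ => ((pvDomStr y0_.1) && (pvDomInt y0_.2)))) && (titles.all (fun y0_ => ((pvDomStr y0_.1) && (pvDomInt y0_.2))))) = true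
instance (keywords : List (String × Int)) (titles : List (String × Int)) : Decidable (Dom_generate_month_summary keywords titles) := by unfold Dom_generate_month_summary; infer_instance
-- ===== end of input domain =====

-- ===== PORT A =====
-- B replaces the 17 per-theme any() scans by an inverted word→theme-index dictionary:
-- one pass over the top words collects matched theme indices; labels of the sorted indices follow.
-- str.title() is not in PySem: ported by hand below (exact for the ASCII domain Dom_ admits).
def pvIsAlpha (c : Char) : Bool := ('a' ≤ c && c ≤ 'z') || ('A' ≤ c && c ≤ 'Z')

def pvUpper (c : Char) : Char := if 'a' ≤ c && c ≤ 'z' then Char.ofNat (c.toNat - 32) else c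

def pvLower (c : Char) : Char := if 'A' ≤ c && c ≤ 'Z' then Char.ofNat (c.toNat + 32) else c

-- s.title(): a letter after a non-letter is uppercased, other letters lowercased (ASCII-exact).
def pvTitleAux : List Char → Bool → List Char
  | [], _ => []
  | c :: cs, prev =>
    (if pvIsAlpha c then (if prev then pvLower c else pvUpper c) else c) :: pvTitleAux cs (pvIsAlpha c)

def pvTitle (s : String) : String := String.ofList (pvTitleAux s.toList false)

def generate_month_summary (keywords : List (String × Int)) (titles : List (String × Int)) : String :=
  if keywords = [] then "Quiet month"
  else
    let top_words := (PySem.List.slice keywords none (some 10)).map (fun k => k.1)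
    let themes : List String := []
    let themes := if ["aws", "sqs", "s3", "lambda", "cloud", "ec2"].any (fun w => top_words.contains w) then themes ++ ["AWS & Cloud"] else themes
    let themes := if ["spark", "hadoop", "databricks", "pyspark"].any (fun w => top_words.contains w) then themes ++ ["Spark & Big Data"] else themes
    let themes := if ["docker", "kubernetes", "k8s", "container"].any (fun w => top_words.contains w) then themes ++ ["DevOps"] else themes
    let themes := if ["model", "training", "neural", "deep", "learning", "tensorflow", "pytorch"].any (fun w => top_words.contains w) then themes ++ ["Machine Learning"] else themes
    let themes := if ["data", "mining", "analysis", "analytics"].any (fun w => top_words.contains w) then themes ++ ["Data Mining"] else themes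
    let themes := if ["fraud", "detection", "classification"].any (fun w => top_words.contains w) then themes ++ ["Fraud Detection"] else themes
    let themes := if ["homework", "assignment", "project", "class", "course"].any (fun w => top_words.contains w) then themes ++ ["Coursework"] else themes
    let themes := if ["paper", "research", "thesis"].any (fun w => top_words.contains w) then themes ++ ["Research"] else themes
    let themes := if ["python", "java", "javascript", "typescript"].any (fun w => top_words.contains w) then themes ++ ["Coding"] else themes
    let themes := if ["robot", "robotics", "ros", "simulation"].any (fun w => top_words.contains w) then themes ++ ["Robotics"] else themes
    let themes := if ["greengrass", "iot", "edge"].any (fun w => top_words.contains w) then themes ++ ["Edge Computing"] else themes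
    let themes := if ["startup", "business", "product", "launch"].any (fun w => top_words.contains w) then themes ++ ["Startup Mode"] else themes
    let themes := if ["interview", "job", "resume", "career"].any (fun w => top_words.contains w) then themes ++ ["Career Hunt"] else themes
    let themes := if ["relma", "scale", "growth"].any (fun w => top_words.contains w) then themes ++ ["Scaling Up"] else themes
    let themes := if ["recipe", "food", "cook"].any (fun w => top_words.contains w) then themes ++ ["Cooking"] else themes
    let themes := if ["spotify", "music", "wrapped"].any (fun w => top_words.contains w) then themes ++ ["Spotify Wrapped"] else themes
    let themes := if ["party", "event", "planning"].any (fun w => top_words.contains w) then themes ++ ["Party Planning"] else themes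
    if themes ≠ [] then PySem.Str.join " + " (PySem.List.slice themes none (some 3))
    else pvTitle (PySem.Str.join " " (PySem.List.slice top_words none (some 3)))

-- ===== PORT B =====
def pvThemeLabels : List String :=
  ["AWS & Cloud", "Spark & Big Data", "DevOps", "Machine Learning",
   "Data Mining", "Fraud Detection", "Coursework", "Research", "Coding",
   "Robotics", "Edge Computing", "Startup Mode", "Career Hunt", "Scaling Up",
   "Cooking", "Spotify Wrapped", "Party Planning"]

def pvThemeWords : List (List String) :=
  [["aws", "sqs", "s3", "lambda", "cloud", "ec2"],
   ["spark", "hadoop", "databricks", "pyspark"],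
   ["docker", "kubernetes", "k8s", "container"],
   ["model", "training", "neural", "deep", "learning", "tensorflow", "pytorch"],
   ["data", "mining", "analysis", "analytics"],
   ["fraud", "detection", "classification"],
   ["homework", "assignment", "project", "class", "course"],
   ["paper", "research", "thesis"],
   ["python", "java", "javascript", "typescript"],
   ["robot", "robotics", "ros", "simulation"],
   ["greengrass", "iot", "edge"],
   ["startup", "business", "product", "launch"],
   ["interview", "job", "resume", "career"],
   ["relma", "scale", "growth"],
   ["recipe", "food", "cook"],
   ["spotify", "music", "wrapped"],
   ["party", "event", "planning"]]

-- _WORD_THEME = {w: i for i, ws in enumerate(_THEME_WORDS) for w in ws}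
def pvWordTheme : PySem.Dict String Int :=
  (PySem.List.enumerate pvThemeWords).foldl
    (fun d p => p.2.foldl (fun d w => d.insert w p.1) d) PySem.Dict.empty

def generate_month_summary_alt (keywords : List (String × Int)) (titles : List (String × Int)) : String :=
  if keywords = [] then "Quiet month"
  else
    let top_words := (PySem.List.slice keywords none (some 10)).map (fun k => k.1)
    -- matched = {_WORD_THEME[w] for w in top_words if w in _WORD_THEME}
    let matched : PySem.Set Int := top_words.foldl
      (fun s w => match pvWordTheme.get? w with
        | some i => s.add i
        | none => s) PySem.Set.empty
    -- themes = [_THEME_LABELS[i] for i in sorted(matched)[:3]]  (every i is in range 0..16)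
    let themes := (PySem.List.slice (PySem.List.sorted matched (fun x => x)) none (some 3)).map
      (fun i => PySem.List.pyGetD pvThemeLabels i "")
    if themes ≠ [] then PySem.Str.join " + " themes
    else pvTitle (PySem.Str.join " " (PySem.List.slice top_words none (some 3)))

-- ===== PRECONDITION & SPEC =====
def Spec_generate_month_summary (keywords : List (String × Int)) (titles : List (String × Int)) (out : String) : Prop := out = generate_month_summary_alt keywords titles
instance (keywords : List (String × Int)) (titles : List (String × Int)) (out : String) : Decidable (Spec_generate_month_summary keywords titles out) := by unfold Spec_generate_month_summary; infer_instance

-- ===== CLAIM (what is proved, stated in full; the proofs are below) =====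
def Claim_equal_generate_month_summary : Prop := ∀ (keywords : List (String × Int)) (titles : List (String × Int)), Dom_generate_month_summary keywords titles → Spec_generate_month_summary keywords titles (generate_month_summary keywords titles)

-- ===== LEMMAS AND PROOFS =====

-- The inverted dictionary, flattened: its items list, in insertion order.
def pvPairs : List (String × Int) :=
  [("aws", 0), ("sqs", 0), ("s3", 0), ("lambda", 0), ("cloud", 0), ("ec2", 0),
   ("spark", 1), ("hadoop", 1), ("databricks", 1), ("pyspark", 1),
   ("docker", 2), ("kubernetes", 2), ("k8s", 2), ("container", 2),
   ("model", 3), ("training", 3), ("neural", 3), ("deep", 3), ("learning", 3), ("tensorflow", 3), ("pytorch", 3),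
   ("data", 4), ("mining", 4), ("analysis", 4), ("analytics", 4),
   ("fraud", 5), ("detection", 5), ("classification", 5),
   ("homework", 6), ("assignment", 6), ("project", 6), ("class", 6), ("course", 6),
   ("paper", 7), ("research", 7), ("thesis", 7),
   ("python", 8), ("java", 8), ("javascript", 8), ("typescript", 8),
   ("robot", 9), ("robotics", 9), ("ros", 9), ("simulation", 9),
   ("greengrass", 10), ("iot", 10), ("edge", 10),
   ("startup", 11), ("business", 11), ("product", 11), ("launch", 11),
   ("interview", 12), ("job", 12), ("resume", 12), ("career", 12),
   ("relma", 13), ("scale", 13), ("growth", 13),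
   ("recipe", 14), ("food", 14), ("cook", 14),
   ("spotify", 15), ("music", 15), ("wrapped", 15),
   ("party", 16), ("event", 16), ("planning", 16)]

def pvIdxs : List Int := [0, 1, 2, 3, 4, 5, 6, 7, 8, 9, 10, 11, 12, 13, 14, 15, 16]

set_option maxRecDepth 10000 in
theorem pvWordTheme_items : pvWordTheme.items = pvPairs := by decide

theorem pv_keys_nodup : (pvPairs.map Prod.fst).Nodup := by decide

theorem pv_get?_iff (w : String) (i : Int) :
    pvWordTheme.get? w = some i ↔ (w, i) ∈ pvPairs := by
  simp only [PySem.Dict.get?, pvWordTheme_items]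
  constructor
  · intro h
    rcases hf : List.find? (fun p => p.1 == w) pvPairs with _ | q
    · simp [hf] at h
    · have h1 := List.find?_some hf
      have h2 := List.mem_of_find?_eq_some hf
      simp [hf] at h
      have hq : q = (w, i) := by cases q; simp_all
      rwa [hq] at h2
  · intro hm
    have hex : (List.find? (fun p => p.1 == w) pvPairs).isSome := by
      rw [List.find?_isSome]
      exact ⟨(w, i), hm, by simp⟩
    rcases hq : List.find? (fun p => p.1 == w) pvPairs with _ | q
    · simp [hq] at hex
    · have h1 := List.find?_some hq
      have h2 := List.mem_of_find?_eq_some hq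
      have hkey : q.1 = w := by simpa using h1
      have hqe : q = (w, i) := List.inj_on_of_nodup_map pv_keys_nodup h2 hm (by simpa using hkey)
      simp [hq, hqe]

theorem pv_idx_range (w : String) (i : Int) (h : (w, i) ∈ pvPairs) : i ∈ pvIdxs := by
  have := (by decide : ∀ p ∈ pvPairs, p.2 ∈ pvIdxs) _ h
  simpa using this

-- membership in the fold that builds the matched-index set
theorem pv_mem_matched (tw : List String) (s : PySem.Set Int) (i : Int) :
    i ∈ tw.foldl (fun s w => match pvWordTheme.get? w with
        | some j => PySem.Set.add s j
        | none => s) s ↔ i ∈ s ∨ ∃ w ∈ tw, pvWordTheme.get? w = some i := by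
  induction tw generalizing s with
  | nil => simp [List.foldl]
  | cons h t ih =>
    simp only [List.foldl_cons, ih]
    rcases hg : pvWordTheme.get? h with _ | j
    · simp [hg]
    · simp only [PySem.Set.mem_add]
      constructor
      · rintro ((hs | rfl) | hw)
        · exact Or.inl hs
        · exact Or.inr ⟨h, by simp, hg⟩
        · exact Or.inr ⟨hw.choose, by simp [hw.choose_spec.1], hw.choose_spec.2⟩
      · rintro (hs | ⟨w, hw, hgw⟩)
        · exact Or.inl (Or.inl hs)
        · rcases List.mem_cons.mp hw with rfl | hwt
          · rw [hg] at hgw; exact Or.inl (Or.inr (by simpa using hgw.symm))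
          · exact Or.inr ⟨w, hwt, hgw⟩

theorem pv_nodup_matched (tw : List String) (s : PySem.Set Int) (hs : s.Nodup) :
    (tw.foldl (fun s w => match pvWordTheme.get? w with
        | some j => PySem.Set.add s j
        | none => s) s).Nodup := by
  induction tw generalizing s with
  | nil => simpa [List.foldl]
  | cons h t ih =>
    simp only [List.foldl_cons]
    rcases hg : pvWordTheme.get? h with _ | j
    · exact ih s hs
    · exact ih _ (PySem.Set.nodup_add s j hs)

-- the matched condition of theme i, i ∈ 0..16, equals A's per-group any() scan
theorem pv_bridge (tw : List String) (i : Int) (hi : i ∈ pvIdxs) :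
    (decide (∃ w ∈ tw, pvWordTheme.get? w = some i)) =
      (PySem.List.pyGetD pvThemeWords i []).any (fun w => tw.contains w) := by
  fin_cases hi <;>
    (rw [Bool.eq_iff_iff]
     simp only [PySem.List.pyGetD_ofNat', pvThemeWords]
     simp only [pv_get?_iff, pvPairs]
     simp) <;>
    aesop

set_option maxRecDepth 10000 in
theorem pv_sorted_matched (tw : List String) :
    PySem.List.sorted (tw.foldl (fun s w => match pvWordTheme.get? w with
        | some j => PySem.Set.add s j
        | none => s) PySem.Set.empty) (fun x => x) =
      pvIdxs.filter (fun i => decide (∃ w ∈ tw, pvWordTheme.get? w = some i)) := by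
  apply PySem.List.sorted_eq_of_perm_of_pairwise_lt
  · refine (List.perm_ext_iff_of_nodup (List.Nodup.filter _ (by decide : pvIdxs.Nodup)) (pv_nodup_matched tw _ List.nodup_nil)).mpr ?_
    intro i
    rw [List.mem_filter, pv_mem_matched]
    constructor
    · rintro ⟨_, h⟩
      exact Or.inr (of_decide_eq_true h)
    · rintro (h | ⟨w, hw, hg⟩)
      · simp at h
      · exact ⟨pv_idx_range w i ((pv_get?_iff w i).mp hg), by exact decide_eq_true ⟨w, hw, hg⟩⟩
  · exact List.Pairwise.filter _ ((by decide : pvIdxs.Pairwise (· < ·)))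


-- rule r = (label, keyword group) of theme i, recovered from B's tables
def pvRuleAt : Int → (String × List String) :=
  fun i => (PySem.List.pyGetD pvThemeLabels i "", PySem.List.pyGetD pvThemeWords i [])

-- A's 17 unrolled if-blocks, as one fold over the (label, group) rules (definitional)
def pvRules : List (String × List String) :=
  [("AWS & Cloud", ["aws", "sqs", "s3", "lambda", "cloud", "ec2"]),
   ("Spark & Big Data", ["spark", "hadoop", "databricks", "pyspark"]),
   ("DevOps", ["docker", "kubernetes", "k8s", "container"]),
   ("Machine Learning", ["model", "training", "neural", "deep", "learning", "tensorflow", "pytorch"]),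
   ("Data Mining", ["data", "mining", "analysis", "analytics"]),
   ("Fraud Detection", ["fraud", "detection", "classification"]),
   ("Coursework", ["homework", "assignment", "project", "class", "course"]),
   ("Research", ["paper", "research", "thesis"]),
   ("Coding", ["python", "java", "javascript", "typescript"]),
   ("Robotics", ["robot", "robotics", "ros", "simulation"]),
   ("Edge Computing", ["greengrass", "iot", "edge"]),
   ("Startup Mode", ["startup", "business", "product", "launch"]),
   ("Career Hunt", ["interview", "job", "resume", "career"]),
   ("Scaling Up", ["relma", "scale", "growth"]),
   ("Cooking", ["recipe", "food", "cook"]),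
   ("Spotify Wrapped", ["spotify", "music", "wrapped"]),
   ("Party Planning", ["party", "event", "planning"])]

set_option maxRecDepth 10000 in
theorem pv_rules_eq : pvRules = pvIdxs.map pvRuleAt := by decide

theorem pv_themesA (tw : List String) :
    pvRules.foldl (fun acc r => if r.2.any (fun w => tw.contains w) then acc ++ [r.1] else acc) [] =
      (pvIdxs.filter (fun i => decide (∃ w ∈ tw, pvWordTheme.get? w = some i))).map
        (fun i => PySem.List.pyGetD pvThemeLabels i "") := by
  rw [PySem.List.foldl_append_if (fun r => r.2.any (fun w => tw.contains w)) (fun r => r.1) pvRules []]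
  rw [List.nil_append, pv_rules_eq, List.filter_map, List.map_map]
  have h4 : List.filter ((fun r => r.2.any fun w => tw.contains w) ∘ pvRuleAt) pvIdxs =
      List.filter (fun i => decide (∃ w ∈ tw, pvWordTheme.get? w = some i)) pvIdxs :=
    List.filter_congr (fun i hi => (pv_bridge tw i hi).symm)
  rw [h4]
  rfl

theorem pv_core (tw : List String) :
    (if (pvRules.foldl (fun acc r => if r.2.any (fun w => tw.contains w) then acc ++ [r.1] else acc) []) ≠ [] then
        PySem.Str.join " + " (PySem.List.slice (pvRules.foldl (fun acc r => if r.2.any (fun w => tw.contains w) then acc ++ [r.1] else acc) []) none (some 3))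
      else pvTitle (PySem.Str.join " " (PySem.List.slice tw none (some 3)))) =
    (if ((PySem.List.slice (PySem.List.sorted (tw.foldl (fun s w => match pvWordTheme.get? w with
            | some i => PySem.Set.add s i
            | none => s) PySem.Set.empty) (fun x => x)) none (some 3)).map
          (fun i => PySem.List.pyGetD pvThemeLabels i "")) ≠ [] then
        PySem.Str.join " + " ((PySem.List.slice (PySem.List.sorted (tw.foldl (fun s w => match pvWordTheme.get? w with
            | some i => PySem.Set.add s i
            | none => s) PySem.Set.empty) (fun x => x)) none (some 3)).map
          (fun i => PySem.List.pyGetD pvThemeLabels i ""))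
      else pvTitle (PySem.Str.join " " (PySem.List.slice tw none (some 3)))) := by
  rw [pv_themesA tw, pv_sorted_matched tw]
  generalize List.filter (fun i => decide (∃ w ∈ tw, pvWordTheme.get? w = some i)) pvIdxs = L
  rw [PySem.List.slice_to (xs := L) (by norm_num),
      PySem.List.slice_to (xs := L.map (fun i => PySem.List.pyGetD pvThemeLabels i "")) (by norm_num),
      ← List.map_take]
  by_cases hL : L = []
  · subst hL; simp
  · rw [if_pos, if_pos]
    · simp [List.take_eq_nil_iff, hL]
    · simp [hL]

-- ===== VERDICT (by name: the statement is the Claim_ definition above) =====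
set_option maxRecDepth 100000 in
set_option maxHeartbeats 1000000 in
theorem generate_month_summary_spec : Claim_equal_generate_month_summary := by
  intro keywords titles _
  unfold Spec_generate_month_summary generate_month_summary generate_month_summary_alt
  cases keywords with
  | nil => rfl
  | cons h t => exact pv_core ((PySem.List.slice (h :: t) none (some 10)).map (fun k => k.1))
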